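-- pv_equiv track=rewrite | github.com/alexandraback/datacollection | solutions_5695413893988352_0/Python/paren/b.py | genAll
-- ===== SOURCE A (Python) =====
-- def genAll(n):
-- 	if n.count("?") == 0:
-- 		return [n]
-- 	ret = []
-- 	if n.count("?") == 1:
-- 		for i in range(10):
-- 			ret.append(n.replace("?", str(i)))
-- 		return ret
-- 	for i in range(10):
-- 		ret.extend(genAll(n.replace("?", str(i), 1)))
-- 	return ret
-- ===== SOURCE B (Python) =====
-- def genAll(n):
--     results = [""]
--     buf = []
--     for ch in n:
--         if ch == "?":
--             prefix = "".join(buf)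
--             results = [r + prefix + d for r in results for d in "0123456789"]
--             buf = []
--         else:
--             buf.append(ch)
--     tail = "".join(buf)
--     return [r + tail for r in results]
-- ===== Notes on version B (the rewrite author's own statement) =====
-- stated objective: alternative
-- what changed: Replaces A's recursive substitute-first-placeholder-and-recurse scheme (count/replace rescans of the whole string at every node of a 10-ary call tree) by a single left-to-right pass that keeps a list of partial prefixes, buffers runs of literal characters, and expands the list tenfold at each question-mark placeholder.
import Mathlib
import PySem

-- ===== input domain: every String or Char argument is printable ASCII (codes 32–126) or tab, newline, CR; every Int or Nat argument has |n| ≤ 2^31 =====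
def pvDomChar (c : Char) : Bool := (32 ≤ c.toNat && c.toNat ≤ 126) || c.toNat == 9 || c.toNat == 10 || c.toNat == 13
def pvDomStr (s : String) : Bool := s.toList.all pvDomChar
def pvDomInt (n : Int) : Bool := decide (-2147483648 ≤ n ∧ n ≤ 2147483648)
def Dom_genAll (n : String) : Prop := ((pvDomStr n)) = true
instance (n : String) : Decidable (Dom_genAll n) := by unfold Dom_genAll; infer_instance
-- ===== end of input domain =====

-- B replaces A's recursive substitute-first-placeholder-and-recurse scheme by one
-- left-to-right pass that keeps a list of partial prefixes, buffers literal runs, and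
-- expands the list tenfold at each question-mark placeholder.

-- ===== PORT A =====

-- exact hand port of Python `s.replace("?", new, 1)` for the one-char pattern "?"
-- (PySem.Chars.replace has no count argument): replace the first '?' only.
def pvReplaceFirst (s : List Char) (new : List Char) : List Char :=
  match s with
  | [] => []
  | c :: t => if c = '?' then new ++ t else c :: pvReplaceFirst t new

-- fuel = (number of '?') + 1 is a totality guard only: every recursive call replaces one
-- '?' by a digit, so the fuel never runs out (proved in pvGenAllF_eq_fills below)
def genAllF (fuel : Nat) (s : List Char) : List (List Char) :=
  match fuel with
  | 0 => []
  | fuel + 1 =>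
    if PySem.Chars.count s ['?'] = 0 then [s]
    else if PySem.Chars.count s ['?'] = 1 then
      (PySem.List.pyRange 0 10 1).foldl
        (fun ret i => ret ++ [PySem.Chars.replace s ['?'] (PySem.Int.toStr i).toList]) []
    else
      (PySem.List.pyRange 0 10 1).foldl
        (fun ret i => ret ++ genAllF fuel (pvReplaceFirst s (PySem.Int.toStr i).toList)) []

def genAll (n : String) : List String :=
  (genAllF (PySem.Chars.count n.toList ['?'] + 1) n.toList).map (fun l => String.ofList l)

-- ===== PORT B =====
-- the port works over List Char, so Python's `prefix = "".join(buf)` is the buffer itself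
def genAll_alt (n : String) : List String :=
  let st := n.toList.foldl
    (fun (st : List (List Char) × List Char) ch =>
      if ch = '?' then
        (st.1.flatMap (fun r => ("0123456789".toList).map (fun d => r ++ st.2 ++ [d])), [])
      else
        (st.1, st.2 ++ [ch]))
    ([[]], [])
  (st.1.map (fun r => r ++ st.2)).map String.ofList

-- ===== PRECONDITION & SPEC =====
def Spec_genAll (n : String) (out : List String) : Prop := out = genAll_alt n
instance (n : String) (out : List String) : Decidable (Spec_genAll n out) := by unfold Spec_genAll; infer_instance

-- ===== CLAIM (what is proved, stated in full; the proofs are below) =====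
def Claim_equal_genAll : Prop := ∀ (n : String), Dom_genAll n → Spec_genAll n (genAll n)

-- ===== LEMMAS AND PROOFS =====

theorem pvCount_go_eq (l : List Char) : ∀ (fuel acc : Nat), l.length ≤ fuel →
    PySem.Chars.count.go ['?'] fuel l acc = acc + l.count '?' := by
  induction l with
  | nil => intro fuel acc _; cases fuel <;> simp [PySem.Chars.count.go]
  | cons c t ih =>
    intro fuel acc h
    cases fuel with
    | zero => simp at h
    | succ f =>
      simp only [PySem.Chars.count.go, List.isPrefixOf]
      by_cases hc : c = '?'
      · simp [hc, ih f (acc + 1) (by simpa using h)]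
        omega
      · simp [hc, Ne.symm hc, ih f acc (by simpa using h)]

theorem pvCount_eq (s : List Char) : PySem.Chars.count s ['?'] = s.count '?' := by
  simpa using pvCount_go_eq s (s.length) 0 le_rfl

def pvFills : List Char → List (List Char)
  | [] => [[]]
  | c :: t =>
    if c = '?' then ("0123456789".toList).flatMap (fun d => (pvFills t).map (d :: ·))
    else (pvFills t).map (c :: ·)

theorem pvFills_noQ (s : List Char) (h : '?' ∉ s) : pvFills s = [s] := by
  induction s with
  | nil => rfl
  | cons c t ih =>
    simp only [List.mem_cons, not_or] at h
    simp [pvFills, Ne.symm h.1, ih h.2]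

theorem pvFills_append_noQ (p t : List Char) (h : '?' ∉ p) :
    pvFills (p ++ t) = (pvFills t).map (p ++ ·) := by
  induction p with
  | nil => simp
  | cons c q ih =>
    simp only [List.mem_cons, not_or] at h
    simp [pvFills, Ne.symm h.1, ih h.2, List.map_map, Function.comp_def]

theorem pvFills_qcons (t : List Char) :
    pvFills ('?' :: t) = ("0123456789".toList).flatMap (fun d => (pvFills t).map (d :: ·)) := by
  simp [pvFills]

theorem pvExistsFirst (s : List Char) (h : '?' ∈ s) :
    ∃ p q, s = p ++ '?' :: q ∧ '?' ∉ p := by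
  induction s with
  | nil => simp at h
  | cons c t ih =>
    by_cases hc : c = '?'
    · exact ⟨[], t, by simp [hc], by simp⟩
    · rcases List.mem_cons.mp h with h' | h'
      · exact absurd h'.symm hc
      · obtain ⟨p, q, hpq, hp⟩ := ih h'
        exact ⟨c :: p, q, by simp [hpq],
          by simp only [List.mem_cons, not_or]; exact ⟨Ne.symm hc, hp⟩⟩

theorem pvReplaceGo_eq (l : List Char) (d : Char) : ∀ (fuel : Nat) (acc : List Char),
    l.length ≤ fuel →
    PySem.Chars.replace.go ['?'] [d] fuel l acc =
      acc.reverse ++ l.map (fun c => if c = '?' then d else c) := by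
  induction l with
  | nil => intro fuel acc _; cases fuel <;> simp [PySem.Chars.replace.go]
  | cons c t ih =>
    intro fuel acc h
    cases fuel with
    | zero => simp at h
    | succ f =>
      simp only [PySem.Chars.replace.go, List.isPrefixOf]
      by_cases hc : c = '?'
      · simp [hc, ih f _ (by simpa using h)]
      · simp [hc, Ne.symm hc, ih f _ (by simpa using h)]

theorem pvReplaceAll_eq_map (s : List Char) (d : Char) :
    PySem.Chars.replace s ['?'] [d] = s.map (fun c => if c = '?' then d else c) := by
  simpa [PySem.Chars.replace] using pvReplaceGo_eq s d s.length [] le_rfl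

theorem pvMap_subst_noQ (p : List Char) (d : Char) (h : '?' ∉ p) :
    p.map (fun c => if c = '?' then d else c) = p := by
  induction p with
  | nil => rfl
  | cons c q ih =>
    simp only [List.mem_cons, not_or] at h
    simp [Ne.symm h.1, ih h.2]

theorem pvReplaceFirst_decomp (p q new : List Char) (h : '?' ∉ p) :
    pvReplaceFirst (p ++ '?' :: q) new = p ++ new ++ q := by
  induction p with
  | nil => simp [pvReplaceFirst]
  | cons c r ih =>
    simp only [List.mem_cons, not_or] at h
    simp [pvReplaceFirst, Ne.symm h.1, ih h.2]

theorem pvFlatMap_congr {α β : Type} (l : List α) (f g : α → List β)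
    (h : ∀ a ∈ l, f a = g a) : l.flatMap f = l.flatMap g := by
  induction l with
  | nil => rfl
  | cons a t ih =>
    simp only [List.flatMap_cons, h a (List.mem_cons_self),
      ih (fun b hb => h b (List.mem_cons_of_mem a hb))]

-- the Python loop `for i in range(10)` over ints, turned into a loop over digit chars
theorem pvRange_flatMap {β : Type} (F : List Char → List β) :
    (PySem.List.pyRange 0 10 1).flatMap (fun i => F (PySem.Int.toStr i).toList) =
      ("0123456789".toList).flatMap (fun d => F [d]) := by
  have hr : PySem.List.pyRange 0 10 1 = [0, 1, 2, 3, 4, 5, 6, 7, 8, 9] := by decide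
  have h0 : (PySem.Int.toStr 0).toList = ['0'] := by decide
  have h1 : (PySem.Int.toStr 1).toList = ['1'] := by decide
  have h2 : (PySem.Int.toStr 2).toList = ['2'] := by decide
  have h3 : (PySem.Int.toStr 3).toList = ['3'] := by decide
  have h4 : (PySem.Int.toStr 4).toList = ['4'] := by decide
  have h5 : (PySem.Int.toStr 5).toList = ['5'] := by decide
  have h6 : (PySem.Int.toStr 6).toList = ['6'] := by decide
  have h7 : (PySem.Int.toStr 7).toList = ['7'] := by decide
  have h8 : (PySem.Int.toStr 8).toList = ['8'] := by decide
  have h9 : (PySem.Int.toStr 9).toList = ['9'] := by decide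
  rw [hr]
  simp only [List.flatMap_cons, List.flatMap_nil, h0, h1, h2, h3, h4, h5, h6, h7, h8, h9]
  rfl

theorem pvFoldl_append_eq_flatMap {α β : Type} (l : List α) (f : α → List β) :
    l.foldl (fun ret i => ret ++ f i) [] = l.flatMap f := by
  suffices h : ∀ acc : List β, l.foldl (fun ret i => ret ++ f i) acc = acc ++ l.flatMap f by
    simpa using h []
  induction l with
  | nil => simp
  | cons a t ih => intro acc; simp [ih]

theorem pvGenAllF_eq_fills (fuel : Nat) : ∀ s : List Char, s.count '?' < fuel →
    genAllF fuel s = pvFills s := by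
  induction fuel with
  | zero => intro s h; omega
  | succ f ih =>
  intro s hf
  by_cases h0 : s.count '?' = 0
  · rw [genAllF, if_pos (by rw [pvCount_eq]; exact h0),
      pvFills_noQ s (by simpa using List.count_eq_zero.mp h0)]
  · obtain ⟨p, q, hpq, hp⟩ := pvExistsFirst s (List.count_pos_iff.mp (Nat.pos_of_ne_zero h0))
    have hcnt : s.count '?' = q.count '?' + 1 := by
      subst hpq; simp [List.count_append, List.count_eq_zero.mpr hp]
    by_cases h1 : s.count '?' = 1
    · -- one '?': the loop of replace-alls
      have hq : '?' ∉ q := by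
        rw [h1] at hcnt
        simpa using List.count_eq_zero.mp (by omega : q.count '?' = 0)
      rw [genAllF, if_neg (by rw [pvCount_eq]; exact h0), if_pos (by rw [pvCount_eq]; exact h1)]
      rw [pvFoldl_append_eq_flatMap, pvRange_flatMap (fun l => [PySem.Chars.replace s ['?'] l])]
      subst hpq
      rw [pvFills_append_noQ p _ hp]
      rw [pvFills_qcons, pvFills_noQ q hq, List.map_flatMap]
      apply pvFlatMap_congr
      intro d _
      simp [pvReplaceAll_eq_map, pvMap_subst_noQ _ _ hp, pvMap_subst_noQ _ _ hq]
    · -- two or more: the recursive loop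
      rw [genAllF, if_neg (by rw [pvCount_eq]; exact h0), if_neg (by rw [pvCount_eq]; exact h1)]
      rw [pvFoldl_append_eq_flatMap,
        pvRange_flatMap (fun l => genAllF f (pvReplaceFirst s l))]
      subst hpq
      rw [pvFills_append_noQ p _ hp]
      rw [pvFills_qcons, List.map_flatMap]
      apply pvFlatMap_congr
      intro d hd
      have hdq : d ≠ '?' := by
        intro h; subst h; revert hd; decide
      rw [pvReplaceFirst_decomp p q [d] hp]
      have hcnt' : (p ++ [d] ++ q).count '?' = q.count '?' := by
        simp [List.count_append, List.count_eq_zero.mpr hp, hdq]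
      rw [ih _ (by omega)]
      rw [show p ++ [d] ++ q = (p ++ [d]) ++ q by simp,
        pvFills_append_noQ (p ++ [d]) q (by simp only [List.mem_append, List.mem_singleton, not_or]; exact ⟨hp, Ne.symm hdq⟩)]
      simp [List.map_map, Function.comp_def]

theorem pvFoldl_B (s : List Char) : ∀ (acc : List (List Char)) (buf : List Char), '?' ∉ buf →
    ((s.foldl
        (fun (st : List (List Char) × List Char) ch =>
          if ch = '?' then
            (st.1.flatMap (fun r => ("0123456789".toList).map (fun d => r ++ st.2 ++ [d])), [])
          else
            (st.1, st.2 ++ [ch]))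
        (acc, buf)).1.map (fun r => r ++
      (s.foldl
        (fun (st : List (List Char) × List Char) ch =>
          if ch = '?' then
            (st.1.flatMap (fun r => ("0123456789".toList).map (fun d => r ++ st.2 ++ [d])), [])
          else
            (st.1, st.2 ++ [ch]))
        (acc, buf)).2)) =
      acc.flatMap (fun r => (pvFills (buf ++ s)).map (r ++ ·)) := by
  induction s with
  | nil =>
    intro acc buf hb
    simp only [List.foldl_nil, List.append_nil, pvFills_noQ buf hb]
    induction acc with
    | nil => rfl
    | cons a l ihacc => simp [ihacc]
  | cons c t ih =>
    intro acc buf hb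
    by_cases hc : c = '?'
    · subst hc
      simp only [List.foldl_cons, if_true]
      rw [ih _ [] (by simp)]
      rw [pvFills_append_noQ buf _ hb, pvFills_qcons, List.map_flatMap]
      simp [List.flatMap_assoc, List.map_map, Function.comp_def]
    · simp only [List.foldl_cons, if_neg hc]
      rw [ih _ (buf ++ [c]) (by
        simp only [List.mem_append, List.mem_singleton, not_or]
        exact ⟨hb, fun h => hc h.symm⟩)]
      rw [show buf ++ [c] ++ t = buf ++ c :: t by simp]

theorem pvAlt_eq_fills (n : String) : genAll_alt n = (pvFills n.toList).map String.ofList := by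
  unfold genAll_alt
  dsimp only
  rw [pvFoldl_B n.toList [[]] [] (by simp)]
  simp

-- ===== VERDICT (by name: the statement is the Claim_ definition above) =====
theorem genAll_spec : Claim_equal_genAll := by
  intro n _
  unfold Spec_genAll
  rw [genAll, pvGenAllF_eq_fills _ _ (by rw [pvCount_eq]; omega), pvAlt_eq_fills]
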